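-- pv_equiv track=rewrite | github.com/AESpider/steg | white_space.py | reveal_eof
-- ===== SOURCE A (Python) =====
-- from typing import List, Optional
--
-- WS_TO_BIT = {' ': '0', '\t': '1'}
--
-- def bits_to_text(bits: str) -> str:
--     """Convert binary string to text (pad to multiple of 8)."""
--     # Pad to multiple of 8
--     if len(bits) % 8:
--         bits += '0' * (8 - len(bits) % 8)
--
--     # Convert each 8-bit chunk to character
--     chars = []
--     for i in range(0, len(bits), 8):
--         byte = bits[i:i+8]
--         chars.append(chr(int(byte, 2)))
--
--     return ''.join(chars)
--
-- def reveal_eof(lines: List[str]) -> str: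
--     """Extract message from trailing whitespace."""
--     bits = []
--
--     for line in lines:
--         core = line.rstrip('\r\n')
--         # Get trailing spaces/tabs
--         trimmed = core.rstrip(' \t')
--         trailing = core[len(trimmed):]
--
--         # Convert whitespace to bits
--         for char in trailing:
--             if char in WS_TO_BIT:
--                 bits.append(WS_TO_BIT[char])
--
--     return bits_to_text(''.join(bits))
-- ===== SOURCE B (Python) =====
-- def reveal_eof(lines):
--     """Extract message from trailing whitespace (streaming bit accumulator)."""
--     out = []
--     cur = 0
--     cnt = 0
--     for line in lines:
--         rev = line[::-1]
--         k = 0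
--         while k < len(rev) and rev[k] in '\r\n':
--             k += 1
--         bits = []
--         while k < len(rev) and rev[k] in ' \t':
--             bits.append(1 if rev[k] == '\t' else 0)
--             k += 1
--         for b in reversed(bits):
--             cur = cur * 2 + b
--             cnt += 1
--             if cnt == 8:
--                 out.append(chr(cur))
--                 cur = 0
--                 cnt = 0
--     if cnt:
--         out.append(chr(cur << (8 - cnt)))
--     return ''.join(out)
-- ===== Notes on version B (the rewrite author's own statement) =====
-- stated objective: alternative
-- what changed: Replaces the two-phase build-a-bit-string-then-pad-and-chunk structure with a single streaming pass: trailing whitespace is found by index scans on the reversed line and each bit is folded into an integer byte accumulator that emits a character every 8 bits, the final partial byte being left-shifted once.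
import Mathlib
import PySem

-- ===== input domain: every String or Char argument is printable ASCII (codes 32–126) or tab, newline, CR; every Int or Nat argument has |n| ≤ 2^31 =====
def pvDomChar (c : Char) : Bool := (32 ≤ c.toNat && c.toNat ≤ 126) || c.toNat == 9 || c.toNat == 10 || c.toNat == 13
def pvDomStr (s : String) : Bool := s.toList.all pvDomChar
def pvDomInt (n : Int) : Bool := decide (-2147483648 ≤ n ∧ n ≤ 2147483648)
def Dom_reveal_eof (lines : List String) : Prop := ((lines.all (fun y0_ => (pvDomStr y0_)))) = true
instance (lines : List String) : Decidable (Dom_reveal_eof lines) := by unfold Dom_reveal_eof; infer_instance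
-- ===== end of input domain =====

-- B replaces A's build-bit-string-then-pad-and-chunk two-phase structure by one streaming pass
-- folding each trailing-whitespace bit into an integer byte accumulator (objective: alternative).

-- shared character predicates (the literal char sets '\r\n' and ' \t' of both Pythons)
def pvIsNl (c : Char) : Bool := c = '\r' || c = '\n'
def pvIsWs (c : Char) : Bool := c = ' ' || c = '\t'

-- ===== PORT A =====
-- str.rstrip(chars): drop the trailing run of chars in the set
def pvRstrip (p : Char → Bool) (s : List Char) : List Char := (s.reverse.dropWhile p).reverse

-- int(byte, 2): exact on strings of '0'/'1' digits, which is all A feeds it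
def pvBinVal (byte : List Char) : Nat := byte.foldl (fun a c => 2 * a + (if c = '1' then 1 else 0)) 0

-- the loop 'for i in range(0, len(bits), 8): chars.append(chr(int(bits[i:i+8], 2)))'
def pvChunks (bits : List Char) : List Char :=
  if h : bits = [] then []
  else Char.ofNat (pvBinVal (bits.take 8)) :: pvChunks (bits.drop 8)
termination_by bits.length
decreasing_by
  have : 0 < bits.length := List.length_pos_of_ne_nil h
  simp [List.length_drop]; omega

def pvBitsToText (bits : List Char) : String :=
  let padded := if bits.length % 8 ≠ 0 then bits ++ List.replicate (8 - bits.length % 8) '0' else bits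
  String.mk (pvChunks padded)

def reveal_eof (lines : List String) : String :=
  let bits := lines.foldl (fun bits line =>
    let core := pvRstrip pvIsNl line.toList
    let trimmed := pvRstrip pvIsWs core
    let trailing := core.drop trimmed.length
    trailing.foldl (fun bits c =>
      if c = ' ' then bits ++ ['0'] else if c = '\t' then bits ++ ['1'] else bits) bits) []
  pvBitsToText bits

-- ===== PORT B =====
def pvBit (c : Char) : Nat := if c = '\t' then 1 else 0

-- one streaming step: state (out, cur, cnt)
def pvStep (s : List Char × Nat × Nat) (b : Nat) : List Char × Nat × Nat :=
  let cur := s.2.1 * 2 + b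
  let cnt := s.2.2 + 1
  if cnt = 8 then (s.1 ++ [Char.ofNat cur], 0, 0) else (s.1, cur, cnt)

def reveal_eof_alt (lines : List String) : String :=
  let s := lines.foldl (fun s line =>
    let rev := line.toList.reverse
    let rest := rev.dropWhile pvIsNl                    -- the first index scan over line[::-1]
    let bits := (rest.takeWhile pvIsWs).map pvBit      -- the second index scan, collecting bits
    bits.reverse.foldl pvStep s) ([], 0, 0)
  String.mk (if s.2.2 ≠ 0 then s.1 ++ [Char.ofNat (s.2.1 * 2 ^ (8 - s.2.2))] else s.1)

-- ===== PRECONDITION & SPEC =====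
def Spec_reveal_eof (lines : List String) (out : String) : Prop := out = reveal_eof_alt lines
instance (lines : List String) (out : String) : Decidable (Spec_reveal_eof lines out) := by unfold Spec_reveal_eof; infer_instance

-- ===== CLAIM (what is proved, stated in full; the proofs are below) =====
def Claim_equal_reveal_eof : Prop := ∀ (lines : List String), Dom_reveal_eof lines → Spec_reveal_eof lines (reveal_eof lines)

-- ===== LEMMAS AND PROOFS =====

-- the trailing whitespace run of a line, in line order
def pvTrail (line : String) : List Char :=
  ((line.toList.reverse.dropWhile pvIsNl).takeWhile pvIsWs).reverse

def pvAllChars (lines : List String) : List Char := lines.flatMap pvTrail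

def pvBitChar (b : Nat) : Char := if b = 1 then '1' else '0'

theorem pvTrail_ws (line : String) : ∀ c ∈ pvTrail line, pvIsWs c := by
  intro c hc
  rw [pvTrail, List.mem_reverse] at hc
  exact List.mem_takeWhile_imp hc

-- A's trailing slice equals pvTrail
theorem rstrip_drop (p : Char → Bool) (core : List Char) :
    core.drop (pvRstrip p core).length = (core.reverse.takeWhile p).reverse := by
  have hc : pvRstrip p core ++ (core.reverse.takeWhile p).reverse = core := by
    rw [pvRstrip, ← List.reverse_append, List.takeWhile_append_dropWhile, List.reverse_reverse]
  nth_rewrite 2 [← hc]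
  exact List.drop_left

theorem trail_eq (line : String) :
    (pvRstrip pvIsNl line.toList).drop
        (pvRstrip pvIsWs (pvRstrip pvIsNl line.toList)).length = pvTrail line := by
  rw [rstrip_drop, pvTrail, pvRstrip, List.reverse_reverse]

-- A's inner loop appends one bit char per trailing char
theorem inner_fold (T : List Char) (hws : ∀ c ∈ T, pvIsWs c) (acc : List Char) :
    T.foldl (fun bits c =>
      if c = ' ' then bits ++ ['0'] else if c = '\t' then bits ++ ['1'] else bits) acc
      = acc ++ T.map (fun c => pvBitChar (pvBit c)) := by
  induction T generalizing acc with
  | nil => simp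
  | cons c T ih =>
    have hc := hws c (by simp)
    have hT : ∀ x ∈ T, pvIsWs x := fun x hx => hws x (by simp [hx])
    rcases (by simpa [pvIsWs] using hc : c = ' ' ∨ c = '\t') with h | h <;>
      subst h <;> rw [List.foldl_cons, ih hT] <;> simp [pvBitChar, pvBit]

-- A's bit list is pvAllChars mapped to bit chars
theorem a_bits (lines : List String) (acc : List Char) :
    lines.foldl (fun bits line =>
      let core := pvRstrip pvIsNl line.toList
      let trimmed := pvRstrip pvIsWs core
      let trailing := core.drop trimmed.length
      trailing.foldl (fun bits c =>
        if c = ' ' then bits ++ ['0'] else if c = '\t' then bits ++ ['1'] else bits) bits) acc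
      = acc ++ (pvAllChars lines).map (fun c => pvBitChar (pvBit c)) := by
  induction lines generalizing acc with
  | nil => simp [pvAllChars]
  | cons l ls ih =>
    simp only [List.foldl_cons, trail_eq l, inner_fold _ (pvTrail_ws l), ih]
    simp [pvAllChars]

-- B's fold over all lines is a fold of pvStep over pvAllChars.map pvBit
theorem b_fold (lines : List String) (s : List Char × Nat × Nat) :
    lines.foldl (fun s line =>
      let rev := line.toList.reverse
      let rest := rev.dropWhile pvIsNl
      let bits := (rest.takeWhile pvIsWs).map pvBit
      bits.reverse.foldl pvStep s) s
      = ((pvAllChars lines).map pvBit).foldl pvStep s := by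
  induction lines generalizing s with
  | nil => simp [pvAllChars]
  | cons l ls ih =>
    simp only [List.foldl_cons, ih]
    simp [pvAllChars, pvTrail, List.map_reverse, List.foldl_append]

def pvFinish (s : List Char × Nat × Nat) : List Char :=
  if s.2.2 ≠ 0 then s.1 ++ [Char.ofNat (s.2.1 * 2 ^ (8 - s.2.2))] else s.1

def pvPad (l : List Char) : List Char :=
  if l.length % 8 ≠ 0 then l ++ List.replicate (8 - l.length % 8) '0' else l

theorem binVal_map (bs : List Nat) (h : ∀ b ∈ bs, b < 2) (a : Nat) :
    (bs.map pvBitChar).foldl (fun a c => 2 * a + (if c = '1' then 1 else 0)) a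
      = bs.foldl (fun a b => 2 * a + b) a := by
  induction bs generalizing a with
  | nil => rfl
  | cons b bs ih =>
    have hb : b < 2 := h b (by simp)
    have hbs : ∀ x ∈ bs, x < 2 := fun x hx => h x (by simp [hx])
    have : (if pvBitChar b = '1' then 1 else 0) = b := by
      interval_cases b <;> simp [pvBitChar]
    simp only [List.map_cons, List.foldl_cons, this]
    exact ih hbs _

theorem binVal_zeros (l : List Char) (n : Nat) :
    pvBinVal (l ++ List.replicate n '0') = pvBinVal l * 2 ^ n := by
  induction n with
  | zero => simp [pvBinVal]
  | succ n ih =>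
    rw [List.replicate_succ' , ← List.append_assoc]
    simp [pvBinVal, List.foldl_append] at *
    rw [ih]; ring

theorem fold8 (bs : List Nat) (h : bs.length = 8) (out : List Char) :
    bs.foldl pvStep (out, 0, 0)
      = (out ++ [Char.ofNat (bs.foldl (fun a b => 2 * a + b) 0)], 0, 0) := by
  match bs, h with
  | [b1, b2, b3, b4, b5, b6, b7, b8], _ =>
    simp [pvStep]
    congr 1
    ring

theorem foldSmall (bs : List Nat) (out : List Char) (cur cnt : Nat)
    (h : cnt + bs.length < 8) :
    bs.foldl pvStep (out, cur, cnt)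
      = (out, bs.foldl (fun a b => 2 * a + b) cur, cnt + bs.length) := by
  induction bs generalizing cur cnt with
  | nil => simp
  | cons b bs ih =>
    have h8 : ¬ (cnt + 1 = 8) := by simp at h; omega
    simp only [List.foldl_cons, pvStep, if_neg h8]
    rw [Nat.mul_comm cur 2, ih _ _ (by simp at h ⊢; omega)]
    simp; omega

theorem pad_append8 (t m : List Char) (ht : t.length = 8) :
    pvPad (t ++ m) = t ++ pvPad m := by
  simp only [pvPad, List.length_append, ht, Nat.add_mod_left]
  split <;> simp

theorem chunks_append8 (t m : List Char) (ht : t.length = 8) :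
    pvChunks (t ++ m) = Char.ofNat (pvBinVal t) :: pvChunks m := by
  rw [pvChunks]
  have hne : t ++ m ≠ [] := by
    intro h; have := congrArg List.length h; simp [ht] at this
  rw [dif_neg hne, List.take_left' ht, List.drop_left' ht]

-- the core lemma: streaming fold = pad-then-chunk
theorem stream_eq_chunks (n : Nat) (bs : List Nat) (hn : bs.length ≤ n)
    (h : ∀ b ∈ bs, b < 2) (out : List Char) :
    pvFinish (bs.foldl pvStep (out, 0, 0)) = out ++ pvChunks (pvPad (bs.map pvBitChar)) := by
  induction n generalizing bs out with
  | zero =>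
    have : bs = [] := List.eq_nil_of_length_eq_zero (by omega)
    subst this; simp [pvFinish, pvPad, pvChunks]
  | succ n ih =>
    by_cases h8 : 8 ≤ bs.length
    · have hbs : bs = bs.take 8 ++ bs.drop 8 := (List.take_append_drop 8 bs).symm
      have ht : (bs.take 8).length = 8 := by rw [List.length_take]; omega
      rw [hbs, List.foldl_append, fold8 _ ht]
      rw [List.map_append, pad_append8 _ _ (by rw [List.length_map, ht]),
        chunks_append8 _ _ (by rw [List.length_map, ht])]
      rw [ih (bs.drop 8) (by simp [List.length_drop]; omega)
        (fun b hb => h b (List.mem_of_mem_drop hb)) _]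
      rw [pvBinVal, binVal_map _ (fun b hb => h b (List.mem_of_mem_take hb)) 0]
      simp
    · push_neg at h8
      rcases Nat.eq_zero_or_pos bs.length with hz | hp
      · have : bs = [] := List.eq_nil_of_length_eq_zero hz
        subst this; simp [pvFinish, pvPad, pvChunks]
      · rw [foldSmall _ _ _ _ (by omega)]
        have hk8 : bs.length % 8 = bs.length := Nat.mod_eq_of_lt h8
        have hpad : pvPad (bs.map pvBitChar)
            = bs.map pvBitChar ++ List.replicate (8 - bs.length) '0' := by
          rw [pvPad, List.length_map, hk8, if_pos (by omega)]
        have hlen8 : (bs.map pvBitChar ++ List.replicate (8 - bs.length) '0').length = 8 := by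
          simp; omega
        have hchunks : pvChunks (bs.map pvBitChar ++ List.replicate (8 - bs.length) '0')
            = [Char.ofNat (pvBinVal (bs.map pvBitChar ++ List.replicate (8 - bs.length) '0'))] := by
          rw [pvChunks, dif_neg (by intro hc; rw [hc] at hlen8; simp at hlen8),
            List.take_of_length_le (by omega), List.drop_eq_nil_of_le (by omega), pvChunks]
          simp
        have hnil : bs ≠ [] := by
          intro hx; rw [hx] at hp; simp at hp
        rw [hpad, hchunks, binVal_zeros, pvBinVal, binVal_map _ h 0]
        simp [pvFinish, hnil]

-- ===== VERDICT (by name: the statement is the Claim_ definition above) =====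
theorem reveal_eof_spec : Claim_equal_reveal_eof := by
  intro lines _
  unfold Spec_reveal_eof reveal_eof reveal_eof_alt
  have hmap : (pvAllChars lines).map (fun c => pvBitChar (pvBit c))
      = ((pvAllChars lines).map pvBit).map pvBitChar := by
    rw [List.map_map]; rfl
  have h2 : ∀ b ∈ (pvAllChars lines).map pvBit, b < 2 := by
    intro b hb
    rcases List.mem_map.mp hb with ⟨c, _, rfl⟩
    simp [pvBit]; split <;> omega
  have hs := stream_eq_chunks ((pvAllChars lines).map pvBit).length _ le_rfl h2 []
  simp only [List.nil_append] at hs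
  rw [a_bits lines [], b_fold lines ([], 0, 0), List.nil_append, hmap]
  show String.mk (pvChunks (pvPad (((pvAllChars lines).map pvBit).map pvBitChar)))
      = String.mk (pvFinish (((pvAllChars lines).map pvBit).foldl pvStep ([], 0, 0)))
  rw [hs]
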